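-- pv_equiv track=rewrite | github.com/TwitOrel/HomeWorksPartA | PartA/py/HW3/ChekingPassword.py | sequenceChars
-- ===== SOURCE A (Python) =====
-- def sequenceChars(password):
--     sequenceChars = 0
--     count = 0
--     tempCount = 0
--     for i in password:
--         if i in "#@$%&":
--             count += 1
--             tempCount += 1
--         else:
--             if tempCount > count:
--                 sequenceChars = tempCount
--                 tempCount = 0
--     if tempCount > sequenceChars:
--         sequenceChars = tempCount
--     if count >= 2:
--         return sequenceChars
--     else:
--         return 0
-- ===== SOURCE B (Python) =====
-- def sequenceChars(password):
--     total = sum(list(password).count(ch) for ch in "#@$%&")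
--     return total if total >= 2 else 0
-- ===== Notes on version B (the rewrite author's own statement) =====
-- stated objective: alternative
-- what changed: A does one pass over the password maintaining three counters (count/tempCount/sequenceChars) with a dead reset branch; B instead iterates over the five special characters, summing each one's occurrence count in the password, and returns that total gated by the >= 2 check.
import Mathlib
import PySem

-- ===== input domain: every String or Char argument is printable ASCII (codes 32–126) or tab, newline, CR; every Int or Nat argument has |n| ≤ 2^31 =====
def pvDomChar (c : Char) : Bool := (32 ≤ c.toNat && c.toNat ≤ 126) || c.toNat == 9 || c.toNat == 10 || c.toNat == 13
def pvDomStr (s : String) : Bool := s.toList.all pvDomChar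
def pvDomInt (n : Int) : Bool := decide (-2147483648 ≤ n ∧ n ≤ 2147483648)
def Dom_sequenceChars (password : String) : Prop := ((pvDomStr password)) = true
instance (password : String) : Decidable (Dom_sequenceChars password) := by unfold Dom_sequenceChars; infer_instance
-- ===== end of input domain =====

-- B replaces A's single-pass three-counter loop by summing each special character's occurrence count over the alphabet "#@$%&", gated by the >= 2 check: an alternative decomposition (same cost).


-- ===== PORT A =====
-- state: (sequenceChars, count, tempCount)
def seqStepA (st : Int × Int × Int) (i : Char) : Int × Int × Int :=
  if ("#@$%&".toList.contains i) then (st.1, st.2.1 + 1, st.2.2 + 1)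
  else if st.2.2 > st.2.1 then (st.2.2, st.2.1, 0) else st

def sequenceChars (password : String) : Int :=
  let st := password.toList.foldl seqStepA (0, 0, 0)
  let seq := if st.2.2 > st.1 then st.2.2 else st.1
  if st.2.1 >= 2 then seq else 0

-- ===== PORT B =====
-- B: per-special-character occurrence counts, summed over the alphabet "#@$%&"
def sequenceChars_alt (password : String) : Int :=
  let total := "#@$%&".toList.foldl
    (fun acc ch => acc + (PySem.List.count password.toList ch : Int)) 0
  if total >= 2 then total else 0

-- ===== PRECONDITION & SPEC =====
def Spec_sequenceChars (password : String) (out : Int) : Prop := out = sequenceChars_alt password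
instance (password : String) (out : Int) : Decidable (Spec_sequenceChars password out) := by unfold Spec_sequenceChars; infer_instance

-- ===== CLAIM (what is proved, stated in full; the proofs are below) =====
def Claim_equal_sequenceChars : Prop := ∀ (password : String), Dom_sequenceChars password → Spec_sequenceChars password (sequenceChars password)

-- ===== LEMMAS AND PROOFS =====

-- invariant: A's fold state stays (0, c, c) where c is the special-char count so far
theorem seqFold_inv (l : List Char) (c : Int) :
    l.foldl seqStepA (0, c, c)
      = (0, c + (l.countP (fun x => "#@$%&".toList.contains x) : Int),
            c + (l.countP (fun x => "#@$%&".toList.contains x) : Int)) := by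
  induction l generalizing c with
  | nil => simp
  | cons x xs ih =>
    simp only [List.foldl_cons, seqStepA, List.countP_cons]
    by_cases h : ("#@$%&".toList.contains x) = true
    · rw [if_pos h, ih (c + 1)]
      have hd : x = '#' ∨ x = '@' ∨ x = '$' ∨ x = '%' ∨ x = '&' := by simpa using h
      rcases hd with h1 | h1 | h1 | h1 | h1 <;> subst h1 <;> simp <;> omega
    · rw [if_neg h]
      rw [if_neg (by omega)]
      rw [ih c]
      simp
      simpa using h

-- summing the five individual counts equals counting membership in the alphabet
theorem sumCounts (l : List Char) :
    ("#@$%&".toList.foldl (fun acc ch => acc + (PySem.List.count l ch : Int)) 0)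
      = (l.countP (fun x => "#@$%&".toList.contains x) : Int) := by
  show (0 : Int) + l.count '#' + l.count '@' + l.count '$' + l.count '%' + l.count '&'
      = (l.countP (fun x => "#@$%&".toList.contains x) : Int)
  induction l with
  | nil => simp
  | cons x xs ih =>
    simp only [List.count_cons, List.countP_cons]
    by_cases h1 : x = '#' <;> by_cases h2 : x = '@' <;> by_cases h3 : x = '$' <;>
      by_cases h4 : x = '%' <;> by_cases h5 : x = '&' <;>
      · subst_vars
        simp_all
        try omega

-- ===== VERDICT (by name: the statement is the Claim_ definition above) =====
theorem sequenceChars_spec : Claim_equal_sequenceChars := by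
  intro password _
  unfold Spec_sequenceChars
  simp only [sequenceChars, sequenceChars_alt, sumCounts]
  rw [show ((0 : Int), (0 : Int), (0 : Int)) = (0, (0:Int) + 0, 0 + 0) by norm_num,
      seqFold_inv]
  simp only [show "#@$%&".toList = ['#', '@', '$', '%', '&'] from rfl] at *
  simp only [zero_add]
  split_ifs <;> omega
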